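-- pv_equiv track=rewrite | github.com/OnumaKenya/bond_chart_optimization | app/frontend/callbacks.py | _sort_options_with_favorites
-- ===== SOURCE A (Python) =====
-- def _sort_options_with_favorites(options, favorites):
--     """★付きお気に入りを先頭に固定したオプションリストを返す。"""
--     fav_set = set(favorites or [])
--     favs, others = [], []
--     for opt in options:
--         value = opt["value"]
--         label = opt["label"]
--         if value in fav_set:
--             new_label = label if label.startswith("★") else f"★ {label}"
--             favs.append({**opt, "label": new_label})
--         else:
--             others.append(opt)
--     fav_order = {v: i for i, v in enumerate(favorites or [])}
--     favs.sort(key=lambda o: fav_order.get(o["value"], 0))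
--     return favs + others
-- ===== SOURCE B (Python) =====
-- def _sort_options_with_favorites(options, favorites):
--     """One stable sort of the whole annotated list instead of partition-then-sort."""
--     fav_set = set(favorites or [])
--     fav_order = {v: i for i, v in enumerate(favorites or [])}
--     annotated = [
--         {**o, "label": o["label"] if o["label"].startswith("★") else f"★ {o['label']}"}
--         if o["value"] in fav_set else o
--         for o in options
--     ]
--     return sorted(annotated, key=lambda o: (o["value"] not in fav_set, fav_order.get(o["value"], 0)))
-- ===== Notes on version B (the rewrite author's own statement) =====
-- stated objective: simpler
-- what changed: Replaces A's explicit partition loop into favs/others followed by sorting favs with a single annotating comprehension and ONE stable sort of the whole list keyed by the tuple (not-a-favorite, favorite index), relying on sort stability to keep non-favorites in input order.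
-- outside the precondition, e.g. on _sort_options_with_favorites([{'value': 'a'}], None): A raises KeyError, B returns [{'value': 'a'}]
import Mathlib
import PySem

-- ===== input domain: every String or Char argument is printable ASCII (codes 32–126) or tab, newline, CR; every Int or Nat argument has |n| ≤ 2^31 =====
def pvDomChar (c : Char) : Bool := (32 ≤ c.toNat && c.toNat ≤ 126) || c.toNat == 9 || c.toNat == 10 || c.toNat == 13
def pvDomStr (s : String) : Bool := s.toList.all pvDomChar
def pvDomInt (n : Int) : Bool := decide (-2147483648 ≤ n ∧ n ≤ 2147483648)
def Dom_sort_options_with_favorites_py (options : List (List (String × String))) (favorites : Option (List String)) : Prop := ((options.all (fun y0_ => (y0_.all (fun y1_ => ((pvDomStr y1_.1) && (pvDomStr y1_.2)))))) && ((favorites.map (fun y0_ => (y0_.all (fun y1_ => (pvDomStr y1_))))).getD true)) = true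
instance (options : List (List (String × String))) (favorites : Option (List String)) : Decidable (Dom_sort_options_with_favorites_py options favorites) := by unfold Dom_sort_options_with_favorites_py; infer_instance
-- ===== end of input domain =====

-- B replaces A's partition loop + sort of the favorites with one annotating map and a SINGLE stable
-- sort of the whole list under the tuple key (not-a-favorite, favorite index); equivalence of the RETURN
-- value is proved for option dicts that carry "value" and "label" keys (the others make Python A raise KeyError).

-- ===== PORT A =====
-- label if label.startswith("★") else f"★ {label}"
def pyStarLabelA (label : String) : String :=
  if PySem.Str.startswith label "★" then label else String.ofList ('★' :: ' ' :: label.toList)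

def sort_options_with_favorites_py (options : List (List (String × String))) (favorites : Option (List String)) : List (List (String × String)) :=
  let favList := favorites.getD []
  let fav_set : PySem.Set String := PySem.Set.ofList favList
  -- for opt in options: partition into favs (with annotated label) and others
  let fo := options.foldl (fun (acc : List (List (String × String)) × List (List (String × String))) opt =>
      if PySem.Set.contains fav_set (((PySem.Dict.mk opt).get? "value").getD "") then
        (acc.1 ++ [((PySem.Dict.mk opt).insert "label"
            (pyStarLabelA (((PySem.Dict.mk opt).get? "label").getD ""))).items], acc.2)
      else (acc.1, acc.2 ++ [opt])) ([], [])
  let fav_order : PySem.Dict String Int :=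
    (PySem.List.enumerate favList).foldl (fun d p => d.insert p.2 p.1) PySem.Dict.empty
  -- favs.sort(key=lambda o: fav_order.get(o["value"], 0)) — Python's sort is stable
  let favs := PySem.List.sorted fo.1
      (fun o => fav_order.getD (((PySem.Dict.mk o).get? "value").getD "") 0) false
  favs ++ fo.2

-- ===== PORT B =====
-- o["label"] if o["label"].startswith("★") else f"★ {o['label']}"
def pyStarLabelB (label : String) : String :=
  if PySem.Str.startswith label "★" then label else String.ofList ('★' :: ' ' :: label.toList)

def sort_options_with_favorites_py_alt (options : List (List (String × String))) (favorites : Option (List String)) : List (List (String × String)) :=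
  let fav_set : PySem.Set String := PySem.Set.ofList (favorites.getD [])
  let fav_order : PySem.Dict String Int :=
    (PySem.List.enumerate (favorites.getD [])).foldl (fun d p => d.insert p.2 p.1) PySem.Dict.empty
  -- annotated = [{**o, "label": …} if o["value"] in fav_set else o for o in options]
  let annotated := options.map (fun o =>
    if PySem.Set.contains fav_set (((PySem.Dict.mk o).get? "value").getD "") then
      ((PySem.Dict.mk o).insert "label" (pyStarLabelB (((PySem.Dict.mk o).get? "label").getD ""))).items
    else o)
  -- sorted(annotated, key=lambda o: (o["value"] not in fav_set, fav_order.get(o["value"], 0))) — stable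
  PySem.List.sorted2 annotated
    (fun o => !(PySem.Set.contains fav_set (((PySem.Dict.mk o).get? "value").getD "")))
    (fun o => fav_order.getD (((PySem.Dict.mk o).get? "value").getD "") 0) false

-- ===== PRECONDITION & SPEC =====
-- Pre_ excludes options missing a "value" or "label" key (Python A raises KeyError there) and options whose
-- key list has duplicates (not representable as a Python dict, so A's behaviour on them is not defined).
def Pre_sort_options_with_favorites_py (options : List (List (String × String))) (favorites : Option (List String)) : Prop :=
  ∀ o ∈ options, (o.map Prod.fst).Nodup ∧ "value" ∈ o.map Prod.fst ∧ "label" ∈ o.map Prod.fst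
instance (options : List (List (String × String))) (favorites : Option (List String)) : Decidable (Pre_sort_options_with_favorites_py options favorites) := by unfold Pre_sort_options_with_favorites_py; infer_instance

def pvWitness_sort_options_with_favorites_py : (List (List (String × String))) × Option (List String) :=
  ([[("value", "a"), ("label", "Alpha")], [("value", "b"), ("label", "Beta")]], some ["b"])

def Spec_sort_options_with_favorites_py (options : List (List (String × String))) (favorites : Option (List String)) (out : List (List (String × String))) : Prop := out = sort_options_with_favorites_py_alt options favorites
instance (options : List (List (String × String))) (favorites : Option (List String)) (out : List (List (String × String))) : Decidable (Spec_sort_options_with_favorites_py options favorites out) := by unfold Spec_sort_options_with_favorites_py; infer_instance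

-- ===== CLAIM (what is proved, stated in full; the proofs are below) =====
def Claim_equal_sort_options_with_favorites_py : Prop := ∀ (options : List (List (String × String))) (favorites : Option (List String)), Dom_sort_options_with_favorites_py options favorites → Pre_sort_options_with_favorites_py options favorites → Spec_sort_options_with_favorites_py options favorites (sort_options_with_favorites_py options favorites)

-- ===== LEMMAS AND PROOFS =====

-- abbreviations for proof use only
def pvVal (o : List (String × String)) : String := ((PySem.Dict.mk o).get? "value").getD ""
def pvAnn (o : List (String × String)) : List (String × String) :=
  ((PySem.Dict.mk o).insert "label" (pyStarLabelA (((PySem.Dict.mk o).get? "label").getD ""))).items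

def pvOrd (l : List String) : PySem.Dict String Int :=
  (PySem.List.enumerate l).foldl (fun d p => d.insert p.2 p.1) PySem.Dict.empty

-- the combined Int key B's tuple key amounts to: a favorite's index, or favs-length for the rest
def pvE (favL : List String) (o : List (String × String)) : Int :=
  if pvVal o ∈ favL then (pvOrd favL).getD (pvVal o) 0 else (favL.length : Int)

theorem pvOrd_aux (l : List String) : ∀ (s : Int) (d : PySem.Dict String Int) (v : String) (i : Int),
    ((PySem.List.enumerate l s).foldl (fun d p => d.insert p.2 p.1) d).get? v = some i →
    d.get? v = some i ∨ ∃ k : Nat, k < l.length ∧ i = s + k := by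
  induction l with
  | nil => intro s d v i h; simp [PySem.List.enumerate] at h; exact Or.inl h
  | cons x xs ih =>
    intro s d v i h
    rw [PySem.List.enumerate_cons] at h
    simp only [List.foldl_cons] at h
    rcases ih (s+1) (d.insert x s) v i h with h' | ⟨k, hk, rfl⟩
    · rw [PySem.Dict.get?_insert] at h'
      by_cases hv : v = x
      · simp [hv] at h'
        exact Or.inr ⟨0, by simp, by omega⟩
      · simp [hv] at h'
        exact Or.inl h'
    · exact Or.inr ⟨k+1, by simp; omega, by push_cast; ring⟩

theorem pvOrd_val_range (l : List String) (v : String) (i : Int)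
    (h : (pvOrd l).get? v = some i) : 0 ≤ i ∧ i.toNat < l.length := by
  rcases pvOrd_aux l 0 PySem.Dict.empty v i h with h' | ⟨k, hk, rfl⟩
  · simp [PySem.Dict.get?_empty] at h'
  · constructor
    · omega
    · simp; omega

theorem pvOrd_isSome (l : List String) (v : String) :
    ((pvOrd l).get? v).isSome = true ↔ v ∈ l := by
  rw [pvOrd, ← PySem.Dict.contains_eq_isSome_get?]
  rw [PySem.Dict.contains_iff_mem_keys, PySem.Dict.keys_foldl_insert_key]
  simp [PySem.List.map_snd_enumerate, PySem.Set.mem_update, PySem.Dict.keys_empty]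

theorem pvOrd_getD_range (l : List String) (v : String) (hv : v ∈ l) :
    0 ≤ (pvOrd l).getD v 0 ∧ ((pvOrd l).getD v 0).toNat < l.length := by
  obtain ⟨i, hi⟩ := Option.isSome_iff_exists.mp ((pvOrd_isSome l v).mpr hv)
  rw [PySem.Dict.getD_eq_get?_getD, hi]
  exact pvOrd_val_range l v i hi

theorem pvOrd_getD_zero (l : List String) (v : String) (hv : v ∉ l) :
    (pvOrd l).getD v 0 = 0 := by
  rw [PySem.Dict.getD_eq_get?_getD]
  cases h : (pvOrd l).get? v with
  | none => rfl
  | some i =>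
    exact absurd ((pvOrd_isSome l v).mp (by rw [h]; rfl)) hv

theorem pv_insertBy_cons_eq {α : Type} (before : α → α → Bool) (x a : α) (l : List α) :
    PySem.List.insertBy before x (a :: l) =
      if before x a then x :: a :: l else a :: PySem.List.insertBy before x l := by
  simp [PySem.List.insertBy]

theorem pv_insertBy_append_left {α : Type} (before : α → α → Bool) (x : α) (A B : List α)
    (hA : ∀ y ∈ A, before x y = false) :
    PySem.List.insertBy before x (A ++ B) = A ++ PySem.List.insertBy before x B := by
  induction A with
  | nil => simp
  | cons a A ih =>
    rw [List.cons_append, pv_insertBy_cons_eq, hA a (by simp)]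
    simp only [Bool.false_eq_true, if_false, List.cons_append]
    rw [ih (fun y hy => hA y (by simp [hy]))]

theorem pv_insertBy_head_before {α : Type} (before : α → α → Bool) (x : α) (B : List α)
    (hB : ∀ y ∈ B, before x y = true) :
    PySem.List.insertBy before x B = x :: B := by
  cases B with
  | nil => rfl
  | cons b B => rw [pv_insertBy_cons_eq, hB b (by simp), if_pos rfl]

theorem pv_insertBy_congr {α : Type} (b1 b2 : α → α → Bool) (x : α) (ys : List α)
    (h : ∀ y ∈ ys, b1 x y = b2 x y) :
    PySem.List.insertBy b1 x ys = PySem.List.insertBy b2 x ys := by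
  induction ys with
  | nil => rfl
  | cons a l ih =>
    rw [pv_insertBy_cons_eq, pv_insertBy_cons_eq, h a (by simp),
      ih (fun y hy => h y (by simp [hy]))]

theorem pv_foldl_insertBy_congr {α : Type} (b1 b2 : α → α → Bool)
    (h : ∀ x y, b1 x y = b2 x y) (xs acc : List α) :
    xs.foldl (fun a x => PySem.List.insertBy b1 x a) acc
      = xs.foldl (fun a x => PySem.List.insertBy b2 x a) acc := by
  induction xs generalizing acc with
  | nil => rfl
  | cons x l ih =>
    simp only [List.foldl_cons]
    rw [pv_insertBy_congr b1 b2 x acc (fun y _ => h x y), ih]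

theorem pv_insertBy_flatMap {α : Type} (key : α → Int) (g : Nat → List α) (n j : Nat) (hj : j < n)
    (hg : ∀ i, i < n → ∀ y ∈ g i, key y = (i : Int)) (x : α) (hx : key x = (j : Int)) :
    PySem.List.insertBy (fun a b => decide (key a < key b)) x ((List.range n).flatMap g) =
      (List.range n).flatMap (fun i => if i = j then g i ++ [x] else g i) := by
  obtain ⟨m, rfl⟩ : ∃ m, n = (j+1) + m := ⟨n - (j+1), by omega⟩
  have hlo : List.flatMap (fun i => if i = j then g i ++ [x] else g i) (List.range j) =
      List.flatMap g (List.range j) := by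
    apply List.flatMap_congr
    intro i hi
    simp only [List.mem_range] at hi
    rw [if_neg (by omega)]
  have hhi : List.flatMap (fun i => if i = j then g i ++ [x] else g i)
        (List.map (fun k => j + 1 + k) (List.range m)) =
      List.flatMap g (List.map (fun k => j + 1 + k) (List.range m)) := by
    apply List.flatMap_congr
    intro i hi
    simp only [List.mem_map, List.mem_range] at hi
    rw [if_neg (by omega)]
  rw [List.range_add, List.flatMap_append, List.flatMap_append, hhi]
  rw [List.range_succ, List.flatMap_append, List.flatMap_append, List.flatMap_singleton,
    List.flatMap_singleton, if_pos rfl, hlo]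
  rw [List.append_assoc, List.append_assoc]
  rw [pv_insertBy_append_left]
  · congr 1
    rw [pv_insertBy_append_left]
    · rw [pv_insertBy_head_before]
      · simp
      · intro y hy
        simp only [List.mem_flatMap, List.mem_map, List.mem_range] at hy
        obtain ⟨i, ⟨k, hk, rfl⟩, hyi⟩ := hy
        have := hg (j+1+k) (by omega) y hyi
        simp [this, hx]
        omega
    · intro y hy
      have := hg j (by omega) y hy
      simp [this, hx]
  · intro y hy
    simp only [List.mem_flatMap, List.mem_range] at hy
    obtain ⟨i, hi, hyi⟩ := hy
    have := hg i (by omega) y hyi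
    simp [this, hx]
    omega

theorem pv_sorted_buckets {α : Type} (xs : List α) (key : α → Int) (n : Nat)
    (h : ∀ x ∈ xs, ∃ i : Nat, i < n ∧ key x = (i : Int)) :
    PySem.List.sorted xs key false =
      (List.range n).flatMap (fun (i : Nat) => xs.filter (fun x => decide (key x = (i : Int)))) := by
  induction xs using List.reverseRecOn with
  | nil => simp [PySem.List.sorted]
  | append_singleton ys x ih =>
    rw [PySem.List.sorted_eq_foldl_insertBy, List.foldl_append, List.foldl_cons, List.foldl_nil,
      ← PySem.List.sorted_eq_foldl_insertBy]
    rw [ih (fun y hy => h y (by simp [hy]))]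
    obtain ⟨j, hj, hxj⟩ := h x (by simp)
    rw [pv_insertBy_flatMap key (fun (i : Nat) => ys.filter (fun y => decide (key y = (i : Int)))) n j hj
      (fun i _ y hy => by simp only [List.mem_filter, decide_eq_true_eq] at hy; exact hy.2) x hxj]
    apply List.flatMap_congr
    intro i hi
    simp only [List.mem_range] at hi
    rw [List.filter_append]
    by_cases hij : i = j
    · subst hij
      simp [hxj]
    · rw [if_neg hij]
      have : key x ≠ (i : Int) := by rw [hxj]; simp; omega
      simp [this]

theorem pyStarLabelB_eq : pyStarLabelB = pyStarLabelA := rfl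

-- the annotated dict keeps the original "value"
theorem pvVal_ann (o : List (String × String)) : pvVal (pvAnn o) = pvVal o := by
  have h : (PySem.Dict.mk (pvAnn o)).get? "value" = (PySem.Dict.mk o).get? "value" := by
    show ((PySem.Dict.mk o).insert "label" _).get? "value" = _
    exact PySem.Dict.get?_insert_of_ne _ _ (by decide)
  rw [pvVal, pvVal, h]

-- B's tuple key compares exactly like the combined Int key pvE
theorem pvE_before (favL : List String) (a b : List (String × String)) :
    ((decide ((!(PySem.Set.contains (PySem.Set.ofList favL) (pvVal a))) <
        (!(PySem.Set.contains (PySem.Set.ofList favL) (pvVal b))))) ||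
      ((!decide ((!(PySem.Set.contains (PySem.Set.ofList favL) (pvVal b))) <
        (!(PySem.Set.contains (PySem.Set.ofList favL) (pvVal a))))) &&
       (decide ((pvOrd favL).getD (pvVal a) 0 < (pvOrd favL).getD (pvVal b) 0))))
    = decide (pvE favL a < pvE favL b) := by
  by_cases ha : pvVal a ∈ favL <;> by_cases hb : pvVal b ∈ favL
  · simp [pvE, ha, hb, PySem.Set.mem_ofList]
  · obtain ⟨h1, h2⟩ := pvOrd_getD_range favL (pvVal a) ha
    simp [pvE, ha, hb, PySem.Set.mem_ofList]
    omega
  · obtain ⟨h1, h2⟩ := pvOrd_getD_range favL (pvVal b) hb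
    simp [pvE, ha, hb, PySem.Set.mem_ofList]
    exact iff_of_false (by decide) (by omega)
  · simp [pvE, ha, hb, PySem.Set.mem_ofList, pvOrd_getD_zero favL (pvVal a) ha,
      pvOrd_getD_zero favL (pvVal b) hb]

-- B's annotating map, named for the proofs
def pvF (favL : List String) (o : List (String × String)) : List (String × String) :=
  if PySem.Set.contains (PySem.Set.ofList favL) (pvVal o) then pvAnn o else o

theorem pvF_of_mem (favL : List String) (o : List (String × String)) (h : pvVal o ∈ favL) :
    pvF favL o = pvAnn o := by
  simp [pvF, PySem.Set.mem_ofList, h]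

theorem pvF_of_not_mem (favL : List String) (o : List (String × String)) (h : pvVal o ∉ favL) :
    pvF favL o = o := by
  simp [pvF, PySem.Set.mem_ofList, h]

theorem pvB_map (favL : List String) (options : List (List (String × String))) :
    options.map (fun o =>
      if PySem.Set.contains (PySem.Set.ofList favL) (((PySem.Dict.mk o).get? "value").getD "") then
        ((PySem.Dict.mk o).insert "label" (pyStarLabelA (((PySem.Dict.mk o).get? "label").getD ""))).items
      else o)
    = options.map (pvF favL) := rfl

-- A's partition loop
theorem pvA_loop (favL : List String) (opts : List (List (String × String))) :
    opts.foldl (fun (acc : List (List (String × String)) × List (List (String × String))) opt =>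
      if PySem.Set.contains (PySem.Set.ofList favL) (((PySem.Dict.mk opt).get? "value").getD "") then
        (acc.1 ++ [((PySem.Dict.mk opt).insert "label"
            (pyStarLabelA (((PySem.Dict.mk opt).get? "label").getD ""))).items], acc.2)
      else (acc.1, acc.2 ++ [opt])) ([], [])
    = ((opts.filter (fun o => PySem.Set.contains (PySem.Set.ofList favL) (pvVal o))).map pvAnn,
       opts.filter (fun o => !(PySem.Set.contains (PySem.Set.ofList favL) (pvVal o)))) := by
  have heq : (fun (acc : List (List (String × String)) × List (List (String × String))) opt =>
      if PySem.Set.contains (PySem.Set.ofList favL) (((PySem.Dict.mk opt).get? "value").getD "") then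
        (acc.1 ++ [((PySem.Dict.mk opt).insert "label"
            (pyStarLabelA (((PySem.Dict.mk opt).get? "label").getD ""))).items], acc.2)
      else (acc.1, acc.2 ++ [opt]))
      = (fun acc opt =>
        ((fun a o => if PySem.Set.contains (PySem.Set.ofList favL) (pvVal o) then a ++ [pvAnn o] else a) acc.1 opt,
         (fun b o => if !(PySem.Set.contains (PySem.Set.ofList favL) (pvVal o)) then b ++ [o] else b) acc.2 opt)) := by
    funext acc opt
    simp only [pvVal, pvAnn]
    by_cases hp : ((PySem.Dict.mk opt).get? "value").getD "" ∈ favL <;>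
      simp [hp, PySem.Set.mem_ofList]
  rw [heq, PySem.List.foldl_prod_mk
        (f := fun a o => if PySem.Set.contains (PySem.Set.ofList favL) (pvVal o) then a ++ [pvAnn o] else a)
        (g := fun b o => if !(PySem.Set.contains (PySem.Set.ofList favL) (pvVal o)) then b ++ [o] else b),
      PySem.List.foldl_append_if, PySem.List.foldl_append_if_eq_filter]
  simp

-- map/filter congruence used to align the two bucket presentations
theorem pv_map_filter_congr {α β : Type} (f g : α → β) (p q : α → Bool) (l : List α)
    (h : ∀ o ∈ l, p o = q o ∧ (p o = true → f o = g o)) :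
    (l.filter p).map f = (l.filter q).map g := by
  induction l with
  | nil => rfl
  | cons a l ih =>
    obtain ⟨hpq, hfg⟩ := h a (by simp)
    rw [List.filter_cons, List.filter_cons, ← hpq]
    cases hp : p a with
    | true => simp [hfg hp, ih (fun o ho => h o (by simp [ho]))]
    | false => simp [ih (fun o ho => h o (by simp [ho]))]

-- B's single stable sort, re-keyed to pvE
theorem pvB_sorted2 (favL : List String) (xs : List (List (String × String))) :
    PySem.List.sorted2 xs
      (fun o => !(PySem.Set.contains (PySem.Set.ofList favL) (((PySem.Dict.mk o).get? "value").getD "")))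
      (fun o => (pvOrd favL).getD (((PySem.Dict.mk o).get? "value").getD "") 0) false
    = PySem.List.sorted xs (pvE favL) false := by
  rw [PySem.List.sorted_eq_foldl_insertBy]
  show xs.foldl (fun acc x => PySem.List.insertBy _ x acc) [] = _
  exact pv_foldl_insertBy_congr _ _ (fun a b => pvE_before favL a b) xs []

-- ===== VERDICT (by name: the statement is the Claim_ definition above) =====
theorem sort_options_with_favorites_py_spec : Claim_equal_sort_options_with_favorites_py := by
  intro options favorites _hDom _hPre
  show sort_options_with_favorites_py options favorites = sort_options_with_favorites_py_alt options favorites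
  simp only [sort_options_with_favorites_py, sort_options_with_favorites_py_alt, pyStarLabelB_eq]
  rw [pvA_loop (favorites.getD []) options]
  rw [show (List.foldl (fun d p => d.insert p.2 p.1) PySem.Dict.empty
      (PySem.List.enumerate (favorites.getD []))) = pvOrd (favorites.getD []) from rfl]
  set favL := favorites.getD [] with hfavL
  set n := favL.length with hn
  rw [pvB_sorted2 favL]
  dsimp only
  rw [pvB_map favL options]
  -- both sides as buckets
  rw [pv_sorted_buckets ((options.filter (fun o => PySem.Set.contains (PySem.Set.ofList favL) (pvVal o))).map pvAnn)
        (fun o => (pvOrd favL).getD (((PySem.Dict.mk o).get? "value").getD "") 0) n ?hmemA]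
  rw [pv_sorted_buckets (options.map (pvF favL)) (pvE favL) (n+1) ?hmemB]
  case hmemA =>
    intro x hx
    obtain ⟨o, ho, rfl⟩ := List.mem_map.mp hx
    have hpa := (List.mem_filter.mp ho).2
    have hmem : pvVal o ∈ favL := by
      simpa [PySem.Set.contains_iff, PySem.Set.mem_ofList] using hpa
    obtain ⟨h0, hlt⟩ := pvOrd_getD_range favL (pvVal o) hmem
    refine ⟨((pvOrd favL).getD (pvVal o) 0).toNat, hlt, ?_⟩
    show (pvOrd favL).getD (pvVal (pvAnn o)) 0 = _
    rw [pvVal_ann o]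
    omega
  case hmemB =>
    intro x hx
    obtain ⟨o, ho, rfl⟩ := List.mem_map.mp hx
    by_cases hm : pvVal o ∈ favL
    · have hv : pvVal (pvF favL o) = pvVal o := by
        rw [pvF_of_mem favL o hm]
        exact pvVal_ann o
      obtain ⟨h0, hlt⟩ := pvOrd_getD_range favL (pvVal o) hm
      refine ⟨((pvOrd favL).getD (pvVal o) 0).toNat, by omega, ?_⟩
      simp only [pvE, hv, hm, if_pos]
      omega
    · refine ⟨n, by omega, ?_⟩
      rw [pvF_of_not_mem favL o hm]
      simp only [pvE, hm, if_neg, if_false]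
      omega
  -- split the n+1 buckets of B into the n favorite buckets and the tail bucket
  rw [List.range_succ, List.flatMap_append, List.flatMap_singleton]
  congr 1
  · -- favorite buckets agree
    apply List.flatMap_congr
    intro i hi
    simp only [List.mem_range] at hi
    rw [List.filter_map, List.filter_map, List.filter_filter]
    apply pv_map_filter_congr
    intro o _
    by_cases hm : pvVal o ∈ favL
    · refine ⟨?_, fun _ => (pvF_of_mem favL o hm).symm⟩
      have hv : pvVal (pvAnn o) = pvVal o := pvVal_ann o
      simp only [Function.comp, pvF_of_mem favL o hm, pvE, hv, hm, if_pos,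
        PySem.Set.contains_iff, PySem.Set.mem_ofList, decide_true, Bool.and_true]
      rw [show (((PySem.Dict.mk (pvAnn o)).get? "value").getD "") = pvVal o from hv]
      simp [PySem.Set.mem_ofList, hm]
    · have hni : ¬ ((favL.length : Int) = (i : Int)) := by omega
      refine ⟨?_, ?_⟩
      · simp [Function.comp, pvF_of_not_mem favL o hm, pvE, PySem.Set.mem_ofList, hm, hni]
      · intro hp
        simp [Function.comp, PySem.Set.mem_ofList, hm] at hp
  · -- the tail bucket is exactly A's others, unannotated
    rw [List.filter_map]
    conv_lhs => rw [← List.map_id (options.filter (fun o => !(PySem.Set.contains (PySem.Set.ofList favL) (pvVal o))))]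
    apply pv_map_filter_congr
    intro o _
    by_cases hm : pvVal o ∈ favL
    · obtain ⟨h0, hlt⟩ := pvOrd_getD_range favL (pvVal o) hm
      have hv : pvVal (pvAnn o) = pvVal o := pvVal_ann o
      have hne : ¬ (pvE favL (pvAnn o) = (n : Int)) := by
        simp only [pvE, hv, hm, if_pos]
        omega
      refine ⟨?_, ?_⟩
      · simp [Function.comp, pvF_of_mem favL o hm, hne, PySem.Set.mem_ofList, hm]
        try omega
      · intro hp
        simp [PySem.Set.mem_ofList, hm] at hp
    · have hne : pvE favL o = (n : Int) := by simp [pvE, hm]; omega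
      refine ⟨?_, fun _ => (pvF_of_not_mem favL o hm).symm⟩
      simp [Function.comp, pvF_of_not_mem favL o hm, hne, PySem.Set.mem_ofList, hm]
      try omega
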